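-- pv_equiv track=rewrite | github.com/kansuke231/Algorithms | Paths/SlashDot.py | DFS
-- ===== SOURCE A (Python) =====
-- from collections import defaultdict
--
-- def explore(G,v,visited,prev,post,ccnum,cc,clock):
-- 	visited[v] = True
-- 	prev[v] = clock[0]
-- 	ccnum[v] = cc
-- 	clock[0]+=1
--
-- 	for u in G[v]:
-- 		if not visited[u]:
-- 			explore(G, u, visited, prev, post, ccnum, cc, clock)
--
-- 	post[v] = clock[0]
-- 	clock[0]+=1
--
-- def DFS(G,visited,prev,post,clock,nodes_sorted=[]):
--
-- 	ccnum = defaultdict(int)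
-- 	cc = 1
--
-- 	if not nodes_sorted:
-- 		nodes = G.keys()
-- 	else:
-- 		nodes = nodes_sorted
--
-- 	for v in nodes:
-- 		if not visited[v]:
-- 			explore(G, v, visited, prev, post, ccnum, cc, clock)
-- 			cc += 1
--
-- 	return ccnum
-- ===== SOURCE B (Python) =====
-- def DFS(G, visited, prev, post, clock, nodes_sorted=[]):
--     # Iterative DFS with an explicit stack of (node, next-neighbor-index) frames
--     # instead of the recursive explore helper.  Same pre/post clocking, same
--     # component numbers, same in-place updates of visited/prev/post/clock.
--     ccnum = {}
--     cc = 1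
--
--     if not nodes_sorted:
--         nodes = G.keys()
--     else:
--         nodes = nodes_sorted
--
--     def open_node(v):
--         visited[v] = True
--         prev[v] = clock[0]
--         ccnum[v] = cc
--         clock[0] += 1
--
--     for s in nodes:
--         if visited[s]:
--             continue
--         open_node(s)
--         stack = [(s, 0)]
--         while stack:
--             v, i = stack.pop()
--             adj = G[v]
--             if i < len(adj):
--                 stack.append((v, i + 1))
--                 u = adj[i]
--                 if not visited[u]:
--                     open_node(u)
--                     stack.append((u, 0))
--             else:
--                 post[v] = clock[0]
--                 clock[0] += 1
--         cc += 1
--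
--     return ccnum
-- ===== Notes on version B (the rewrite author's own statement) =====
-- stated objective: alternative
-- what changed: The recursive explore helper is replaced by a single iterative loop over an explicit stack of (node, next-neighbor-index) frames that produces the same pre/post clocking, component numbers and in-place dict updates without recursion.
import Mathlib
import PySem

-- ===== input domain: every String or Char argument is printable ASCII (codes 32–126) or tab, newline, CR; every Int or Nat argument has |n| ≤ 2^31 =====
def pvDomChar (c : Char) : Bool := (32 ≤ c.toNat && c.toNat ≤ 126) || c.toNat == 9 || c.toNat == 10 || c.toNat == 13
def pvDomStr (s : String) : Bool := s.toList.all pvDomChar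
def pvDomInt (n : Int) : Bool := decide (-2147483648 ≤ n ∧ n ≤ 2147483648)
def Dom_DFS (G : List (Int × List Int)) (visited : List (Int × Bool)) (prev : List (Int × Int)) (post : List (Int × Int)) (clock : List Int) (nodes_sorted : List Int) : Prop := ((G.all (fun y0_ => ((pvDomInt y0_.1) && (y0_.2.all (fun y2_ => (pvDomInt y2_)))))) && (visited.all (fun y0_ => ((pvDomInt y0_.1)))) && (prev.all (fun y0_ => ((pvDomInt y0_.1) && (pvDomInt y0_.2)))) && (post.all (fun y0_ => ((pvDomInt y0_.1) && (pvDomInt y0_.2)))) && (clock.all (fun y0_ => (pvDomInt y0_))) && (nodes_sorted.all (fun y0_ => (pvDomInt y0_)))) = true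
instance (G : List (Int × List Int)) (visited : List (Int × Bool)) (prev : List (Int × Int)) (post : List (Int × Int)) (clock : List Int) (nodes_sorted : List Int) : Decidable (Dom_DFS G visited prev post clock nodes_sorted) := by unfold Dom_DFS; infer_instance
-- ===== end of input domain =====

-- B replaces the recursive `explore` helper by one iterative loop over an explicit
-- stack of (node, next-neighbor-index) frames (same values, same cost; objective:
-- alternative decomposition).  A and B mutate visited/prev/post/clock identically in
-- Python; the equivalence proved here is about the returned ccnum dict.

-- ===== PORT A =====
-- shared state record: the four dicts and the clock list that Python mutates in place
structure DfsSt where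
  visited : PySem.Dict Int Bool
  prev : PySem.Dict Int Int
  post : PySem.Dict Int Int
  ccnum : PySem.Dict Int Int
  clock : List Int
deriving Repr, DecidableEq

-- clock[0] += 1 (clock is non-empty under Pre_DFS; on [] Python raises IndexError)
def pvBump (c : List Int) : List Int :=
  match c with
  | [] => []
  | x :: t => (x + 1) :: t

-- the recursive helper `explore`; fuel only makes the recursion structural (the
-- chosen fuel in DFS always suffices, as the proofs below establish)
def exploreA (G : PySem.Dict Int (List Int)) (cc : Int) : Nat → Int → DfsSt → DfsSt
  | 0, _, st => st
  | f + 1, v, st =>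
    let st1 : DfsSt :=
      { visited := st.visited.insert v true
        prev := st.prev.insert v (st.clock.headD 0)
        post := st.post
        ccnum := st.ccnum.insert v cc
        clock := pvBump st.clock }
    let st2 := (G.getD v []).foldl
      (fun s u => if s.visited.getD u false then s else exploreA G cc f u s) st1
    { st2 with post := st2.post.insert v (st2.clock.headD 0), clock := pvBump st2.clock }

def DFS (G : List (Int × List Int)) (visited : List (Int × Bool)) (prev : List (Int × Int)) (post : List (Int × Int)) (clock : List Int) (nodes_sorted : List Int) : List (Int × Int) :=
  let Gd := PySem.Dict.mk G
  let nodes := if nodes_sorted = [] then Gd.keys else nodes_sorted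
  let fuel := (G.flatMap (fun p => p.2)).length + 2
  let st0 : DfsSt := ⟨PySem.Dict.mk visited, PySem.Dict.mk prev, PySem.Dict.mk post, PySem.Dict.empty, clock⟩
  let r := nodes.foldl
    (fun (acc : Int × DfsSt) v =>
      if acc.2.visited.getD v false then acc
      else (acc.1 + 1, exploreA Gd acc.1 fuel v acc.2)) (1, st0)
  r.2.ccnum.items

-- ===== PORT B =====
-- open_node(v): mark v, record its pre-time and component, tick the clock
def openNodeB (cc : Int) (v : Int) (st : DfsSt) : DfsSt :=
  { visited := st.visited.insert v true
    prev := st.prev.insert v (st.clock.headD 0)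
    post := st.post
    ccnum := st.ccnum.insert v cc
    clock := pvBump st.clock }

-- the while loop over the explicit stack of (node, next-neighbor-index) frames;
-- head of the list = top of the stack; fuel only makes the loop structural
def loopB (G : PySem.Dict Int (List Int)) (cc : Int) : Nat → List (Int × Int) → DfsSt → DfsSt
  | 0, _, st => st
  | _ + 1, [], st => st
  | f + 1, (v, i) :: rest, st =>
    let adj := G.getD v []
    if i < (adj.length : Int) then
      let u := PySem.List.pyGetD adj i 0
      if st.visited.getD u false then
        loopB G cc f ((v, i + 1) :: rest) st
      else
        loopB G cc f ((u, 0) :: (v, i + 1) :: rest) (openNodeB cc u st)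
    else
      loopB G cc f rest { st with post := st.post.insert v (st.clock.headD 0), clock := pvBump st.clock }

def DFS_alt (G : List (Int × List Int)) (visited : List (Int × Bool)) (prev : List (Int × Int)) (post : List (Int × Int)) (clock : List Int) (nodes_sorted : List Int) : List (Int × Int) :=
  let Gd := PySem.Dict.mk G
  let nodes := if nodes_sorted = [] then Gd.keys else nodes_sorted
  let deg := (G.map (fun p => p.2.length)).foldl max 0
  let fuel := ((G.flatMap (fun p => p.2)).length + 1) * (deg + 2) + 2
  let st0 : DfsSt := ⟨PySem.Dict.mk visited, PySem.Dict.mk prev, PySem.Dict.mk post, PySem.Dict.empty, clock⟩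
  let r := nodes.foldl
    (fun (acc : Int × DfsSt) s =>
      if acc.2.visited.getD s false then acc
      else (acc.1 + 1, loopB Gd acc.1 fuel [(s, 0)] (openNodeB acc.1 s acc.2))) (1, st0)
  r.2.ccnum.items

-- ===== PRECONDITION & SPEC =====
-- the set of nodes the Python actually explores: start nodes that are initially
-- unvisited, closed under stepping to initially-unvisited neighbors (a plain
-- reachability closure; iterating the step once per possible new node reaches the
-- fixpoint)
def pvReachStep (G : List (Int × List Int)) (visited : List (Int × Bool)) (E : List Int) : List Int :=
  PySem.Set.update E (E.flatMap (fun x =>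
    ((PySem.Dict.mk G).getD x []).filter (fun u => !((PySem.Dict.mk visited).getD u true))))

def pvReach (G : List (Int × List Int)) (visited : List (Int × Bool)) (roots : List Int) : List Int :=
  (pvReachStep G visited)^[G.length + roots.length + (G.flatMap (fun p => p.2)).length + 1]
    (PySem.Set.ofList (roots.filter (fun v => !((PySem.Dict.mk visited).getD v true))))

-- Pre_DFS holds exactly when the Python returns: every start node has a visited
-- entry, the clock list is non-empty whenever some node actually gets explored
-- (clock[0] would raise IndexError on []), and every explored node has a G entry
-- whose neighbors all have visited entries (otherwise a dict lookup raises KeyError)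
def Pre_DFS (G : List (Int × List Int)) (visited : List (Int × Bool)) (prev : List (Int × Int)) (post : List (Int × Int)) (clock : List Int) (nodes_sorted : List Int) : Prop :=
  (∀ v ∈ (if nodes_sorted = [] then G.map Prod.fst else nodes_sorted), ((PySem.Dict.mk visited).get? v).isSome) ∧
  (pvReach G visited (if nodes_sorted = [] then G.map Prod.fst else nodes_sorted) = [] ∨ clock ≠ []) ∧
  (∀ x ∈ pvReach G visited (if nodes_sorted = [] then G.map Prod.fst else nodes_sorted),
    ((PySem.Dict.mk G).get? x).isSome ∧
    ∀ u ∈ (PySem.Dict.mk G).getD x [], ((PySem.Dict.mk visited).get? u).isSome)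
instance (G : List (Int × List Int)) (visited : List (Int × Bool)) (prev : List (Int × Int)) (post : List (Int × Int)) (clock : List Int) (nodes_sorted : List Int) : Decidable (Pre_DFS G visited prev post clock nodes_sorted) := by unfold Pre_DFS; infer_instance

def pvWitness_DFS : (List (Int × List Int)) × (List (Int × Bool)) × (List (Int × Int)) × (List (Int × Int)) × List Int × List Int :=
  ([(1, [2]), (2, [1]), (3, [])], [(1, false), (2, false), (3, false)], [], [], [0], [])

def Spec_DFS (G : List (Int × List Int)) (visited : List (Int × Bool)) (prev : List (Int × Int)) (post : List (Int × Int)) (clock : List Int) (nodes_sorted : List Int) (out : List (Int × Int)) : Prop := out = DFS_alt G visited prev post clock nodes_sorted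
instance (G : List (Int × List Int)) (visited : List (Int × Bool)) (prev : List (Int × Int)) (post : List (Int × Int)) (clock : List Int) (nodes_sorted : List Int) (out : List (Int × Int)) : Decidable (Spec_DFS G visited prev post clock nodes_sorted out) := by unfold Spec_DFS; infer_instance

-- ===== CLAIM (what is proved, stated in full; the proofs are below) =====
def Claim_equal_DFS : Prop := ∀ (G : List (Int × List Int)) (visited : List (Int × Bool)) (prev : List (Int × Int)) (post : List (Int × Int)) (clock : List Int) (nodes_sorted : List Int), Dom_DFS G visited prev post clock nodes_sorted → Pre_DFS G visited prev post clock nodes_sorted → Spec_DFS G visited prev post clock nodes_sorted (DFS G visited prev post clock nodes_sorted)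

-- ===== LEMMAS AND PROOFS =====

-- proof-side abbreviations for the two halves of A's explore body
def closeA (v : Int) (st : DfsSt) : DfsSt :=
  { st with post := st.post.insert v (st.clock.headD 0), clock := pvBump st.clock }

def stepA (G : PySem.Dict Int (List Int)) (cc : Int) (f : Nat) (s : DfsSt) (u : Int) : DfsSt :=
  if s.visited.getD u false then s else exploreA G cc f u s

theorem exploreA_succ (G : PySem.Dict Int (List Int)) (cc : Int) (f : Nat) (v : Int) (st : DfsSt) :
    exploreA G cc (f + 1) v st
      = closeA v ((G.getD v []).foldl (stepA G cc f) (openNodeB cc v st)) := rfl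

-- the measure: how many (occurrences of) potential recursion targets are unvisited
def muR (R : List Int) (st : DfsSt) : Nat :=
  (R.filter (fun u => !(st.visited.getD u false))).length

-- frame potential: bounds the remaining loop iterations spent on the frames themselves
def framesSum (G : PySem.Dict Int (List Int)) (stack : List (Int × Int)) : Nat :=
  (stack.map (fun p => 1 + (((G.getD p.1 []).length : Int) - p.2).toNat)).sum

-- total potential of loopB's configuration
def phiB (G : PySem.Dict Int (List Int)) (R : List Int) (D : Nat)
    (stack : List (Int × Int)) (st : DfsSt) : Nat :=
  muR R st * (D + 2) + framesSum G stack

theorem framesSum_cons (G : PySem.Dict Int (List Int)) (v i : Int) (rest : List (Int × Int)) :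
    framesSum G ((v, i) :: rest)
      = (1 + (((G.getD v []).length : Int) - i).toNat) + framesSum G rest := by
  simp [framesSum]

theorem vis_insert_true (d : PySem.Dict Int Bool) (v x : Int) (h : d.getD x false = true) :
    (d.insert v true).getD x false = true := by
  rw [PySem.Dict.getD_insert]; split_ifs <;> simp [h]

theorem exploreA_vis_mono (G : PySem.Dict Int (List Int)) (cc : Int) :
    ∀ (f : Nat) (v x : Int) (st : DfsSt), st.visited.getD x false = true →
      (exploreA G cc f v st).visited.getD x false = true := by
  intro f
  induction f with
  | zero => intro v x st h; exact h
  | succ f IH =>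
    intro v x st h
    rw [exploreA_succ]
    have hfold : ∀ (l : List Int) (s : DfsSt), s.visited.getD x false = true →
        (l.foldl (stepA G cc f) s).visited.getD x false = true := by
      intro l
      induction l with
      | nil => intro s hs; exact hs
      | cons a t iht =>
        intro s hs
        rw [List.foldl_cons]
        apply iht
        unfold stepA
        split_ifs with hv
        · exact hs
        · exact IH a x s hs
    exact hfold _ _ (vis_insert_true st.visited v x h)

theorem foldA_vis_mono (G : PySem.Dict Int (List Int)) (cc : Int) (f : Nat) :
    ∀ (l : List Int) (s : DfsSt) (x : Int), s.visited.getD x false = true →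
      (l.foldl (stepA G cc f) s).visited.getD x false = true := by
  intro l
  induction l with
  | nil => intro s x hs; exact hs
  | cons a t iht =>
    intro s x hs
    rw [List.foldl_cons]
    apply iht
    unfold stepA
    split_ifs with hv
    · exact hs
    · exact exploreA_vis_mono G cc f a x s hs

theorem muR_mono_of_vis (R : List Int) (s s' : DfsSt)
    (h : ∀ x, s.visited.getD x false = true → s'.visited.getD x false = true) :
    muR R s' ≤ muR R s := by
  unfold muR
  rw [← List.countP_eq_length_filter, ← List.countP_eq_length_filter]
  apply List.countP_mono_left
  intro a _ ha
  cases hv : s.visited.getD a false with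
  | false => simp [hv]
  | true => have := h a hv; simp [this] at ha

theorem muR_le_length (R : List Int) (st : DfsSt) : muR R st ≤ R.length :=
  List.length_filter_le _ _

theorem muR_open_lt (R : List Int) (cc v : Int) (st : DfsSt)
    (hv : st.visited.getD v false = false) (hm : v ∈ R) :
    muR R (openNodeB cc v st) < muR R st := by
  have hpt : ∀ x : Int, ((!(openNodeB cc v st).visited.getD x false) = true) →
      ((!st.visited.getD x false) = true) := by
    intro x hx
    cases hvx : st.visited.getD x false with
    | false => simp
    | true =>
      have h2 := vis_insert_true st.visited v x hvx
      simp only [openNodeB] at hx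
      rw [h2] at hx
      simp at hx
  obtain ⟨l1, l2, rfl⟩ := List.append_of_mem hm
  unfold muR
  rw [← List.countP_eq_length_filter, ← List.countP_eq_length_filter,
    List.countP_append, List.countP_append, List.countP_cons, List.countP_cons]
  have m1 : List.countP (fun u => !(openNodeB cc v st).visited.getD u false) l1
      ≤ List.countP (fun u => !st.visited.getD u false) l1 :=
    List.countP_mono_left (fun a _ => hpt a)
  have m2 : List.countP (fun u => !(openNodeB cc v st).visited.getD u false) l2
      ≤ List.countP (fun u => !st.visited.getD u false) l2 :=
    List.countP_mono_left (fun a _ => hpt a)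
  have hv1 : (!st.visited.getD v false) = true := by rw [hv]; rfl
  have hv2 : (!(openNodeB cc v st).visited.getD v false) = false := by
    show (!(st.visited.insert v true).getD v false) = false
    rw [PySem.Dict.getD_insert]
    simp
  simp only [hv1, hv2]
  split_ifs <;> first | omega | exact ‹False›.elim

theorem muR_foldA_le (G : PySem.Dict Int (List Int)) (cc : Int) (R : List Int) (f : Nat)
    (l : List Int) (s : DfsSt) : muR R (l.foldl (stepA G cc f) s) ≤ muR R s := by
  apply muR_mono_of_vis
  intro x hx
  exact foldA_vis_mono G cc f l s x hx

theorem muR_closeA (R : List Int) (v : Int) (st : DfsSt) :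
    muR R (closeA v st) = muR R st := rfl

theorem muR_exploreA_lt (G : PySem.Dict Int (List Int)) (cc : Int) (R : List Int)
    (f : Nat) (u : Int) (st : DfsSt)
    (hv : st.visited.getD u false = false) (hm : u ∈ R) (hf : 1 ≤ f) :
    muR R (exploreA G cc f u st) < muR R st := by
  obtain ⟨f', rfl⟩ : ∃ f', f = f' + 1 := ⟨f - 1, by omega⟩
  rw [exploreA_succ, muR_closeA]
  calc muR R ((G.getD u []).foldl (stepA G cc f') (openNodeB cc u st))
      ≤ muR R (openNodeB cc u st) := muR_foldA_le G cc R f' _ _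
    _ < muR R st := muR_open_lt R cc u st hv hm

theorem loopB_nil (G : PySem.Dict Int (List Int)) (cc : Int) (f : Nat) (st : DfsSt) :
    loopB G cc f [] st = st := by cases f <;> rfl

theorem pyGetD_mem_of (adj : List Int) (i : Int) (h0 : 0 ≤ i) (h1 : i < (adj.length : Int)) :
    PySem.List.pyGetD adj i 0 ∈ adj := by
  apply PySem.List.pyGetD_mem
  simp [PySem.Raise.InRange]
  omega

theorem muR_pos (R : List Int) (st : DfsSt) (v : Int) (hm : v ∈ R)
    (hv : st.visited.getD v false = false) : 1 ≤ muR R st := by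
  have := muR_open_lt R 0 v st hv hm
  omega

theorem loopB_irrel (G : PySem.Dict Int (List Int)) (cc : Int) (R : List Int) (D : Nat)
    (hadj : ∀ v u, u ∈ G.getD v [] → u ∈ R)
    (hdeg : ∀ v, (G.getD v []).length ≤ D) :
    ∀ (f g : Nat) (stack : List (Int × Int)) (st : DfsSt),
      (∀ p ∈ stack, 0 ≤ p.2) →
      phiB G R D stack st < f → phiB G R D stack st < g →
      loopB G cc f stack st = loopB G cc g stack st := by
  intro f
  induction f with
  | zero => intro g stack st hnn h1 h2; exact absurd h1 (Nat.not_lt_zero _)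
  | succ f IH =>
    intro g stack st hnn h1 h2
    rcases stack with _ | ⟨⟨v, i⟩, rest⟩
    · rw [loopB_nil, loopB_nil]
    · have hi : (0:Int) ≤ i := hnn (v, i) (List.mem_cons_self)
      have hphi : 1 ≤ phiB G R D ((v,i)::rest) st := by
        rw [phiB, framesSum_cons]; omega
      obtain ⟨g', rfl⟩ : ∃ g', g = g' + 1 := ⟨g - 1, by omega⟩
      show loopB G cc (f+1) ((v,i)::rest) st = loopB G cc (g'+1) ((v,i)::rest) st
      simp only [loopB]
      by_cases hlt : i < ((G.getD v []).length : Int)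
      · rw [if_pos hlt, if_pos hlt]
        by_cases hvis : st.visited.getD (PySem.List.pyGetD (G.getD v []) i 0) false = true
        · rw [if_pos hvis, if_pos hvis]
          have hnn' : ∀ p ∈ ((v, i+1) :: rest), 0 ≤ p.2 := by
            intro p hp
            rcases List.mem_cons.mp hp with rfl | hp'
            · omega
            · exact hnn p (List.mem_cons_of_mem _ hp')
          have e1 : phiB G R D ((v, i+1)::rest) st + 1 = phiB G R D ((v,i)::rest) st := by
            rw [phiB, phiB, framesSum_cons, framesSum_cons]
            generalize muR R st * (D + 2) = M
            omega
          exact IH g' _ _ hnn' (by omega) (by omega)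
        · rw [if_neg hvis, if_neg hvis]
          have humem : PySem.List.pyGetD (G.getD v []) i 0 ∈ G.getD v [] :=
            pyGetD_mem_of _ _ hi hlt
          have hvis' : st.visited.getD (PySem.List.pyGetD (G.getD v []) i 0) false = false := by
            cases h : st.visited.getD (PySem.List.pyGetD (G.getD v []) i 0) false
            · rfl
            · exact absurd h hvis
          have hmu := muR_open_lt R cc (PySem.List.pyGetD (G.getD v []) i 0) st hvis'
            (hadj v _ humem)
          have hnn' : ∀ p ∈ ((PySem.List.pyGetD (G.getD v []) i 0, 0) :: (v, i+1) :: rest), 0 ≤ p.2 := by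
            intro p hp
            rcases List.mem_cons.mp hp with rfl | hp'
            · simp
            · rcases List.mem_cons.mp hp' with rfl | hp''
              · omega
              · exact hnn p (List.mem_cons_of_mem _ hp'')
          have e2 : phiB G R D ((PySem.List.pyGetD (G.getD v []) i 0, 0) :: (v, i+1) :: rest)
              (openNodeB cc (PySem.List.pyGetD (G.getD v []) i 0) st) + 1
              ≤ phiB G R D ((v,i)::rest) st := by
            rw [phiB, phiB, framesSum_cons, framesSum_cons, framesSum_cons]
            have hdegu := hdeg (PySem.List.pyGetD (G.getD v []) i 0)
            have hprod : muR R (openNodeB cc (PySem.List.pyGetD (G.getD v []) i 0) st) * (D+2) + (D+2)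
                ≤ muR R st * (D+2) := by
              calc muR R (openNodeB cc (PySem.List.pyGetD (G.getD v []) i 0) st) * (D+2) + (D+2)
                  = (muR R (openNodeB cc (PySem.List.pyGetD (G.getD v []) i 0) st) + 1) * (D+2) := by ring
                _ ≤ muR R st * (D+2) := Nat.mul_le_mul_right _ hmu
            generalize muR R (openNodeB cc (PySem.List.pyGetD (G.getD v []) i 0) st) * (D + 2) = M1 at hprod ⊢
            generalize muR R st * (D + 2) = M2 at hprod ⊢
            omega
          exact IH g' _ _ hnn' (by omega) (by omega)
      · rw [if_neg hlt, if_neg hlt]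
        have hnn' : ∀ p ∈ rest, 0 ≤ p.2 := fun p hp => hnn p (List.mem_cons_of_mem _ hp)
        have hmueq : muR R { st with post := st.post.insert v (st.clock.headD 0), clock := pvBump st.clock } = muR R st := rfl
        have e3 : phiB G R D rest { st with post := st.post.insert v (st.clock.headD 0), clock := pvBump st.clock } + 1
            ≤ phiB G R D ((v,i)::rest) st := by
          rw [phiB, phiB, framesSum_cons, hmueq]
          generalize muR R st * (D + 2) = M
          omega
        exact IH g' _ _ hnn' (by omega) (by omega)

theorem simB (G : PySem.Dict Int (List Int)) (cc : Int) (R : List Int) (D : Nat)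
    (hadj : ∀ v u, u ∈ G.getD v [] → u ∈ R)
    (hdeg : ∀ v, (G.getD v []).length ≤ D) :
    ∀ (n : Nat) (v i : Int) (rest : List (Int × Int)) (st : DfsSt) (fA fB fB' : Nat),
      muR R st * (D + 1) + ((G.getD v []).length - i.toNat) < n →
      0 ≤ i →
      (∀ p ∈ rest, 0 ≤ p.2) →
      muR R st < fA →
      phiB G R D ((v, i) :: rest) st < fB →
      phiB G R D rest st < fB' →
      loopB G cc fB ((v, i) :: rest) st
        = loopB G cc fB' rest
            (closeA v (((G.getD v []).drop i.toNat).foldl (stepA G cc fA) st)) := by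
  intro n
  induction n using Nat.strong_induction_on with
  | _ n IH =>
  intro v i rest st fA fB fB' hq hi hnn hfA hfB hfB'
  have hphi1 : 1 ≤ phiB G R D ((v,i)::rest) st := by rw [phiB, framesSum_cons]; omega
  obtain ⟨fB0, rfl⟩ : ∃ k, fB = k + 1 := ⟨fB - 1, by omega⟩
  conv_lhs => simp only [loopB]
  by_cases hlt : i < (((G.getD v []).length : Int))
  · rw [if_pos hlt]
    have hitn : i.toNat < (G.getD v []).length := by omega
    have hdrop : (G.getD v []).drop i.toNat
        = (G.getD v [])[i.toNat] :: (G.getD v []).drop (i.toNat + 1) :=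
      List.drop_eq_getElem_cons hitn
    have hu : PySem.List.pyGetD (G.getD v []) i 0 = (G.getD v [])[i.toNat] :=
      PySem.List.pyGetD_eq_getElem _ _ hi hlt
    have humem : (G.getD v [])[i.toNat] ∈ G.getD v [] := List.getElem_mem hitn
    have hi1 : (i+1).toNat = i.toNat + 1 := by omega
    by_cases hvis : st.visited.getD ((G.getD v [])[i.toNat]) false = true
    · rw [hu, if_pos hvis]
      rw [hdrop, List.foldl_cons]
      have hstep : stepA G cc fA st ((G.getD v [])[i.toNat]) = st := by
        unfold stepA; rw [if_pos hvis]
      rw [hstep]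
      have e1 : phiB G R D ((v, i+1)::rest) st + 1 = phiB G R D ((v,i)::rest) st := by
        rw [phiB, phiB, framesSum_cons, framesSum_cons]
        generalize muR R st * (D + 2) = M
        omega
      have hrec := IH (muR R st * (D + 1) + ((G.getD v []).length - (i+1).toNat) + 1)
        (by generalize muR R st * (D + 1) = M at hq ⊢; omega)
        v (i+1) rest st fA fB0 fB' (by omega) (by omega) hnn hfA (by omega) hfB'
      rw [hi1] at hrec
      exact hrec
    · rw [hu, if_neg hvis]
      set u := (G.getD v [])[i.toNat] with hudef
      have hvisf : st.visited.getD u false = false := by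
        cases h : st.visited.getD u false
        · rfl
        · exact absurd h hvis
      have huR : u ∈ R := hadj v u humem
      have hmu_pos : 1 ≤ muR R st := muR_pos R st u huR hvisf
      obtain ⟨fA', rfl⟩ : ∃ k, fA = k + 1 := ⟨fA - 1, by omega⟩
      have hmu_open : muR R (openNodeB cc u st) < muR R st := muR_open_lt R cc u st hvisf huR
      have hmu_st2 : muR R (exploreA G cc (fA'+1) u st) < muR R st :=
        muR_exploreA_lt G cc R (fA'+1) u st hvisf huR (by omega)
      have hdegu := hdeg u
      have hdegv := hdeg v
      have hp1 : muR R (openNodeB cc u st) * (D+1) + (D+1) ≤ muR R st * (D+1) := by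
        calc muR R (openNodeB cc u st) * (D+1) + (D+1)
            = (muR R (openNodeB cc u st) + 1) * (D+1) := by ring
          _ ≤ muR R st * (D+1) := Nat.mul_le_mul_right _ hmu_open
      have hp2 : muR R (openNodeB cc u st) * (D+2) + (D+2) ≤ muR R st * (D+2) := by
        calc muR R (openNodeB cc u st) * (D+2) + (D+2)
            = (muR R (openNodeB cc u st) + 1) * (D+2) := by ring
          _ ≤ muR R st * (D+2) := Nat.mul_le_mul_right _ hmu_open
      have hp3 : muR R (exploreA G cc (fA'+1) u st) * (D+2) + (D+2) ≤ muR R st * (D+2) := by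
        calc muR R (exploreA G cc (fA'+1) u st) * (D+2) + (D+2)
            = (muR R (exploreA G cc (fA'+1) u st) + 1) * (D+2) := by ring
          _ ≤ muR R st * (D+2) := Nat.mul_le_mul_right _ hmu_st2
      have hp4 : muR R (exploreA G cc (fA'+1) u st) * (D+1) + (D+1) ≤ muR R st * (D+1) := by
        calc muR R (exploreA G cc (fA'+1) u st) * (D+1) + (D+1)
            = (muR R (exploreA G cc (fA'+1) u st) + 1) * (D+1) := by ring
          _ ≤ muR R st * (D+1) := Nat.mul_le_mul_right _ hmu_st2
      have hnn1 : ∀ p ∈ ((v, i+1) :: rest), 0 ≤ p.2 := by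
        intro p hp
        rcases List.mem_cons.mp hp with rfl | hp'
        · omega
        · exact hnn p hp'
      -- phi facts, all phrased against the original potential
      have hphiold : phiB G R D ((v,i)::rest) st
          = muR R st * (D + 2) + (1 + (((G.getD v []).length : Int) - i).toNat) + framesSum G rest := by
        rw [phiB, framesSum_cons]; ring
      have e2 : phiB G R D ((u,0) :: (v, i+1) :: rest) (openNodeB cc u st) + 1
          ≤ phiB G R D ((v,i)::rest) st := by
        rw [phiB, phiB, framesSum_cons, framesSum_cons, framesSum_cons]
        generalize muR R (openNodeB cc u st) * (D + 2) = M1 at hp2 ⊢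
        generalize muR R st * (D + 2) = M2 at hp2 ⊢
        omega
      have e3 : phiB G R D ((v, i+1) :: rest) (openNodeB cc u st) + 1
          ≤ phiB G R D ((v,i)::rest) st := by
        rw [phiB, phiB, framesSum_cons, framesSum_cons]
        generalize muR R (openNodeB cc u st) * (D + 2) = M1 at hp2 ⊢
        generalize muR R st * (D + 2) = M2 at hp2 ⊢
        omega
      have e4 : phiB G R D ((v, i+1) :: rest) (exploreA G cc (fA'+1) u st) + 1
          ≤ phiB G R D ((v,i)::rest) st := by
        rw [phiB, phiB, framesSum_cons, framesSum_cons]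
        generalize muR R (exploreA G cc (fA'+1) u st) * (D + 2) = M1 at hp3 ⊢
        generalize muR R st * (D + 2) = M2 at hp3 ⊢
        omega
      have e5 : phiB G R D rest (exploreA G cc (fA'+1) u st) ≤ phiB G R D rest st := by
        rw [phiB, phiB]
        have := Nat.mul_le_mul_right (D+2) (Nat.le_of_lt hmu_st2)
        omega
      -- first application: run the (u, 0) frame to completion
      have step1 := IH (muR R (openNodeB cc u st) * (D + 1) + (G.getD u []).length + 1)
        (by generalize muR R (openNodeB cc u st) * (D + 1) = M1 at hp1 ⊢
            generalize muR R st * (D + 1) = M2 at hp1 hq ⊢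
            omega)
        u 0 ((v, i+1) :: rest) (openNodeB cc u st) fA' fB0 fB0
        (by simp) (by omega) hnn1 (by omega) (by omega) (by omega)
      simp only [Int.toNat_zero, List.drop_zero] at step1
      rw [← exploreA_succ] at step1
      -- second application: continue with the (v, i+1) frame
      have step2 := IH (muR R (exploreA G cc (fA'+1) u st) * (D + 1)
          + ((G.getD v []).length - (i+1).toNat) + 1)
        (by generalize muR R (exploreA G cc (fA'+1) u st) * (D + 1) = M1 at hp4 ⊢
            generalize muR R st * (D + 1) = M2 at hp4 hq ⊢
            omega)
        v (i+1) rest (exploreA G cc (fA'+1) u st) (fA'+1) fB0 fB'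
        (by omega) (by omega) hnn (by omega) (by omega) (by omega)
      rw [hi1] at step2
      rw [step1, step2]
      -- match the right-hand sides: the fold over drop i.toNat starts with u
      rw [hdrop, List.foldl_cons]
      have hstep : stepA G cc (fA'+1) st u = exploreA G cc (fA'+1) u st := by
        unfold stepA; rw [if_neg hvis]
      rw [hstep]
  · rw [if_neg hlt]
    have hdropnil : (G.getD v []).drop i.toNat = [] := by
      apply List.drop_eq_nil_of_le
      omega
    rw [hdropnil, List.foldl_nil]
    show loopB G cc fB0 rest (closeA v st) = loopB G cc fB' rest (closeA v st)
    have hphieq : phiB G R D rest (closeA v st) = phiB G R D rest st := by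
      rw [phiB, phiB, muR_closeA]
    apply loopB_irrel G cc R D hadj hdeg _ _ _ _ hnn
    · rw [hphieq]
      have : phiB G R D ((v,i)::rest) st = muR R st * (D+2)
          + (1 + (((G.getD v []).length : Int) - i).toNat) + framesSum G rest := by
        rw [phiB, framesSum_cons]; ring
      rw [phiB]
      rw [this] at hfB
      omega
    · rw [hphieq]; exact hfB'

theorem framesSum_nil (G : PySem.Dict Int (List Int)) : framesSum G [] = 0 := rfl

theorem explore_eq_loop (G : PySem.Dict Int (List Int)) (R : List Int) (D : Nat)
    (hadj : ∀ v u, u ∈ G.getD v [] → u ∈ R)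
    (hdeg : ∀ v, (G.getD v []).length ≤ D) (cc v : Int) (st : DfsSt) :
    exploreA G cc (R.length + 2) v st
      = loopB G cc ((R.length + 1) * (D + 2) + 2) [(v, 0)] (openNodeB cc v st) := by
  have hmo : muR R (openNodeB cc v st) ≤ R.length := muR_le_length _ _
  have hdegv := hdeg v
  have hprod2 : muR R (openNodeB cc v st) * (D+2) ≤ R.length * (D+2) :=
    Nat.mul_le_mul_right _ hmo
  have hexp : (R.length + 1) * (D+2) = R.length * (D+2) + (D+2) := by ring
  have h := simB G cc R D hadj hdeg
    (muR R (openNodeB cc v st) * (D+1) + (G.getD v []).length + 1)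
    v 0 [] (openNodeB cc v st) (R.length + 1)
    ((R.length + 1) * (D + 2) + 2) ((R.length + 1) * (D + 2) + 2)
    (by generalize muR R (openNodeB cc v st) * (D+1) = M; omega)
    (by omega)
    (by simp)
    (by omega)
    (by rw [phiB, framesSum_cons, framesSum_nil]
        generalize hg1 : muR R (openNodeB cc v st) * (D+2) = M1 at hprod2
        generalize hg2 : R.length * (D+2) = M2 at hprod2 hexp
        rw [hexp]
        omega)
    (by rw [phiB, framesSum_nil]
        generalize hg1 : muR R (openNodeB cc v st) * (D+2) = M1 at hprod2
        generalize hg2 : R.length * (D+2) = M2 at hprod2 hexp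
        rw [hexp]
        omega)
  rw [loopB_nil] at h
  simp only [Int.toNat_zero, List.drop_zero] at h
  rw [show R.length + 2 = (R.length + 1) + 1 from rfl, exploreA_succ]
  exact h.symm

theorem foldDFS_eq (G : PySem.Dict Int (List Int)) (R : List Int) (D : Nat)
    (hadj : ∀ v u, u ∈ G.getD v [] → u ∈ R)
    (hdeg : ∀ v, (G.getD v []).length ≤ D) :
    ∀ (nodes : List Int) (acc : Int × DfsSt),
      nodes.foldl (fun acc v =>
          if acc.2.visited.getD v false then acc
          else (acc.1 + 1, exploreA G acc.1 (R.length + 2) v acc.2)) acc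
        = nodes.foldl (fun acc s =>
          if acc.2.visited.getD s false then acc
          else (acc.1 + 1, loopB G acc.1 ((R.length + 1) * (D + 2) + 2) [(s, 0)]
                  (openNodeB acc.1 s acc.2))) acc := by
  intro nodes
  induction nodes with
  | nil => intro acc; rfl
  | cons v t ih =>
    intro acc
    rw [List.foldl_cons, List.foldl_cons]
    by_cases hv : acc.2.visited.getD v false = true
    · rw [if_pos hv, if_pos hv, ih]
    · rw [if_neg hv, if_neg hv, explore_eq_loop G R D hadj hdeg, ih]

-- ===== VERDICT (by name: the statement is the Claim_ definition above) =====
theorem DFS_spec : Claim_equal_DFS := by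
  intro G visited prev post clock nodes_sorted _hdom _hpre
  unfold Spec_DFS DFS DFS_alt
  dsimp only
  have hadj : ∀ v u, u ∈ (PySem.Dict.mk G).getD v [] → u ∈ G.flatMap (fun p => p.2) := by
    intro v u hu
    rw [PySem.Dict.getD_eq_get?_getD] at hu
    cases h : (PySem.Dict.mk G).get? v with
    | none => rw [h] at hu; simp at hu
    | some l =>
      rw [h] at hu
      simp only [Option.getD_some] at hu
      have hmem : (v, l) ∈ (PySem.Dict.mk G).items := PySem.Dict.mem_items_of_get?_eq_some _ h
      exact List.mem_flatMap.mpr ⟨(v, l), hmem, hu⟩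
  have hdeg : ∀ v, ((PySem.Dict.mk G).getD v []).length ≤ (G.map (fun p => p.2.length)).foldl max 0 := by
    intro v
    rw [PySem.Dict.getD_eq_get?_getD]
    cases h : (PySem.Dict.mk G).get? v with
    | none => simp
    | some l =>
      simp only [Option.getD_some]
      have hmem : (v, l) ∈ (PySem.Dict.mk G).items := PySem.Dict.mem_items_of_get?_eq_some _ h
      exact (PySem.List.le_foldl_max (G.map (fun p => p.2.length)) 0).2 l.length
        (List.mem_map.mpr ⟨(v, l), hmem, rfl⟩)
  rw [foldDFS_eq (PySem.Dict.mk G) (G.flatMap (fun p => p.2))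
    ((G.map (fun p => p.2.length)).foldl max 0) hadj hdeg]
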